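-- pv_equiv track=rewrite | github.com/DuarteArribas/EPOS-Providers-DB-Upload | provider_db_upload/uploader/databaseUpload.py | _delete_repeated_lines
-- ===== SOURCE A (Python) =====
-- def _delete_repeated_lines(lines : list) -> list:
--   previous_lines = {}
--   for line in lines:
--     time_and_hours = str(line[0].split(" ")[0]) + str(line[0].split(" ")[0])
--     if time_and_hours not in previous_lines:
--       previous_lines[time_and_hours] = [line]
--     else:
--       previous_lines[time_and_hours].append(line)
--   for key in previous_lines:
--     if len(previous_lines[key]) > 1:
--       for line in previous_lines[key][:-1]:
--         lines.remove(line)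
--   return lines
-- ===== SOURCE B (Python) =====
-- def _delete_repeated_lines(lines : list) -> list:
--   seen_keys = set()
--   kept = []
--   for line in reversed(lines):
--     time_and_hours = line[0].split(" ")[0] * 2
--     if time_and_hours not in seen_keys:
--       seen_keys.add(time_and_hours)
--       kept.append(line)
--   kept.reverse()
--   lines[:] = kept
--   return lines
-- ===== Notes on version B (the rewrite author's own statement) =====
-- stated objective: alternative
-- what changed: Replaces A's group-by-key dict followed by repeated list.remove scans with a single reversed pass over the list keeping the first (i.e. last-in-order) line per derived key using a set of seen keys.
-- outside the precondition, e.g. on _delete_repeated_lines([['a b'], []]): A raises IndexError, B raises IndexError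
import Mathlib
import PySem

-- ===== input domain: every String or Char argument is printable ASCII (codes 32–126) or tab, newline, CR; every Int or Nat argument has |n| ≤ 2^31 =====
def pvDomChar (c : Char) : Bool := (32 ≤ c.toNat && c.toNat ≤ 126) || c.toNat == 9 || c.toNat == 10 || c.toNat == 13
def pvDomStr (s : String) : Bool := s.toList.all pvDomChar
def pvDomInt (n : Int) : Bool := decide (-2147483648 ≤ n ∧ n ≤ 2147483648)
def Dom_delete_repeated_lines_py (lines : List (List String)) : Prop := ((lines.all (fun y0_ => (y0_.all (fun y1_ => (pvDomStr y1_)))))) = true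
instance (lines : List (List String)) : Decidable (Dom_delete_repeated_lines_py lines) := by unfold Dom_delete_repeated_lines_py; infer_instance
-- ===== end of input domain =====

-- B replaces A's group-by-key dict + quadratic list.remove passes with one reversed pass and a
-- set of seen keys (same return value; both Pythons also mutate `lines` to that same value).

-- ===== PORT A =====
-- the derived key: str(line[0].split(" ")[0]) + str(line[0].split(" ")[0])
-- (line[0] raises IndexError on an empty line — those inputs are excluded by Pre_; the .getD
-- defaults below are never reached inside Pre_.  split(" ") is never empty, so [0] of it exists.)
def pvKey (line : List String) : String :=
  let s := (PySem.List.pyGet? line 0).getD ""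
  let w := ((PySem.Str.split? s " ").getD []).headD ""
  w ++ w

def delete_repeated_lines_py (lines : List (List String)) : List (List String) :=
  let prev : PySem.Dict String (List (List String)) :=
    lines.foldl (fun d line =>
      if d.contains (pvKey line) = false then
        d.insert (pvKey line) [line]
      else
        d.modify (pvKey line) [] (fun g => g ++ [line])) PySem.Dict.empty
  prev.keys.foldl (fun ls k =>
    if 1 < ((prev.get? k).getD []).length then
      (PySem.List.slice ((prev.get? k).getD []) none (some (-1))).foldl
        (fun ls line => (PySem.List.remove? ls line).getD ls) ls
    else ls) lines

-- ===== PORT B =====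
def delete_repeated_lines_py_alt (lines : List (List String)) : List (List String) :=
  let st := lines.reverse.foldl
    (fun (st : PySem.Set String × List (List String)) line =>
      if PySem.Set.contains st.1 (pvKey line) = false then
        (PySem.Set.add st.1 (pvKey line), st.2 ++ [line])
      else st)
    (PySem.Set.empty, [])
  st.2.reverse

-- ===== PRECONDITION & SPEC =====
-- Pre_ excludes lines containing an empty inner list: Python A raises IndexError on line[0] there.
def Pre_delete_repeated_lines_py (lines : List (List String)) : Prop := ∀ l ∈ lines, l ≠ []
instance (lines : List (List String)) : Decidable (Pre_delete_repeated_lines_py lines) := by unfold Pre_delete_repeated_lines_py; infer_instance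
def pvWitness_delete_repeated_lines_py : List (List String) := [["12:00 a", "x"], ["12:00 b", "y"], ["13:00 c"]]

def Spec_delete_repeated_lines_py (lines : List (List String)) (out : List (List String)) : Prop := out = delete_repeated_lines_py_alt lines
instance (lines : List (List String)) (out : List (List String)) : Decidable (Spec_delete_repeated_lines_py lines out) := by unfold Spec_delete_repeated_lines_py; infer_instance

-- ===== CLAIM (what is proved, stated in full; the proofs are below) =====
def Claim_equal_delete_repeated_lines_py : Prop := ∀ (lines : List (List String)), Dom_delete_repeated_lines_py lines → Pre_delete_repeated_lines_py lines → Spec_delete_repeated_lines_py lines (delete_repeated_lines_py lines)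

-- ===== LEMMAS AND PROOFS =====

-- the common specification both ports are reduced to: keep a line iff no later line has the same key
def pvKeep : List (List String) → List (List String)
  | [] => []
  | x :: xs => if xs.any (fun y => pvKey y == pvKey x) then pvKeep xs else x :: pvKeep xs

-- effect of A's removal pass for one key k
def pvPrune (k : String) : List (List String) → List (List String)
  | [] => []
  | x :: xs => if pvKey x == k && xs.any (fun y => pvKey y == k) then pvPrune k xs else x :: pvPrune k xs

-- effect of A's removal passes for a collection K of keys
def pvPruneSet (K : List String) : List (List String) → List (List String)
  | [] => []
  | x :: xs => if K.contains (pvKey x) && xs.any (fun y => pvKey y == pvKey x) then pvPruneSet K xs else x :: pvPruneSet K xs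

theorem pvPrune_sub {k : String} {y : List String} : ∀ {ls : List (List String)}, y ∈ pvPrune k ls → y ∈ ls := by
  intro ls
  induction ls with
  | nil => simp [pvPrune]
  | cons x xs ih =>
    simp only [pvPrune]
    split
    · intro h; exact List.mem_cons_of_mem _ (ih h)
    · intro h
      rcases List.mem_cons.mp h with h | h
      · exact h ▸ List.mem_cons_self
      · exact List.mem_cons_of_mem _ (ih h)

theorem pvPrune_any (k c : String) (hck : c ≠ k) : ∀ (ls : List (List String)),
    (pvPrune k ls).any (fun y => pvKey y == c) = ls.any (fun y => pvKey y == c) := by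
  intro ls
  induction ls with
  | nil => simp [pvPrune]
  | cons x xs ih =>
    simp only [pvPrune]
    split
    · rename_i h
      have hx : pvKey x = k := by
        have := (Bool.and_eq_true _ _).mp h |>.1
        exact eq_of_beq this
      simp [List.any_cons, ih, hx, Ne.symm hck]
    · simp [List.any_cons, ih]

theorem pvPrune_filter (k c : String) (hck : c ≠ k) : ∀ (ls : List (List String)),
    (pvPrune k ls).filter (fun l => pvKey l == c) = ls.filter (fun l => pvKey l == c) := by
  intro ls
  induction ls with
  | nil => simp [pvPrune]
  | cons x xs ih =>
    simp only [pvPrune]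
    split
    · rename_i h
      have hx : pvKey x = k := by
        have := (Bool.and_eq_true _ _).mp h |>.1
        exact eq_of_beq this
      rw [List.filter_cons_of_neg (by simp [hx, Ne.symm hck]), ih]
    · simp only [List.filter_cons]
      rw [ih]

-- glue: empty/nonempty filter vs any
theorem pv_any_of_filter_nil {α : Type} {p : α → Bool} {xs : List α} (h : xs.filter p = []) :
    xs.any p = false := by
  rw [List.any_eq_false]; intro y hy; simpa using List.filter_eq_nil_iff.mp h y hy

theorem pv_any_of_filter_ne {α : Type} {p : α → Bool} {xs : List α} (h : xs.filter p ≠ []) :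
    xs.any p = true := by
  rw [List.any_eq_true]
  rcases List.exists_mem_of_ne_nil _ h with ⟨y, hy⟩
  exact ⟨y, List.mem_of_mem_filter hy, by simpa using List.of_mem_filter hy⟩

-- a prune leaves a list with at most one occurrence of key k unchanged
theorem pvPrune_of_le_one (k : String) : ∀ (ls : List (List String)),
    (ls.filter (fun l => pvKey l == k)).length ≤ 1 → pvPrune k ls = ls := by
  intro ls
  induction ls with
  | nil => simp [pvPrune]
  | cons x xs ih =>
    intro h
    by_cases hx : pvKey x = k
    · rw [List.filter_cons_of_pos (by simp [hx]), List.length_cons] at h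
      have hfe : xs.filter (fun l => pvKey l == k) = [] :=
        List.length_eq_zero_iff.mp (by omega)
      have hany : xs.any (fun y => pvKey y == k) = false := pv_any_of_filter_nil hfe
      simp only [pvPrune, hany, Bool.and_false, if_neg (by decide : ¬(false = true))]
      rw [ih (by simp [hfe])]
    · have hb : (pvKey x == k) = false := by simpa using hx
      simp only [pvPrune, hb, Bool.false_and, if_neg (by decide : ¬(false = true))]
      rw [List.filter_cons_of_neg (by simp [hx])] at h
      rw [ih h]

-- removing a list of values all ≠ x passes over the head x
theorem pvRemove_cons_ne (x : List String) : ∀ (vs : List (List String)) (t : List (List String)),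
    (∀ v ∈ vs, v ≠ x) →
    vs.foldl (fun ls v => (PySem.List.remove? ls v).getD ls) (x :: t)
      = x :: vs.foldl (fun ls v => (PySem.List.remove? ls v).getD ls) t := by
  intro vs
  induction vs with
  | nil => intro t _; rfl
  | cons v vs ih =>
    intro t hne
    have hvx : x ≠ v := fun h => (hne v (by simp)) h.symm
    simp only [List.foldl_cons]
    rw [PySem.List.remove?_cons_of_ne t hvx]
    cases hrv : PySem.List.remove? t v with
    | none => simpa [hrv] using ih t (fun v hv => hne v (by simp [hv]))
    | some u => simpa [hrv] using ih u (fun v hv => hne v (by simp [hv]))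

-- the crux: A's removal loop for key k computes pvPrune k
theorem pvRemoveLoop (k : String) : ∀ (ls : List (List String)),
    ((ls.filter (fun l => pvKey l == k)).dropLast).foldl
        (fun ls v => (PySem.List.remove? ls v).getD ls) ls = pvPrune k ls := by
  intro ls
  induction ls with
  | nil => simp [pvPrune]
  | cons x t ih =>
    by_cases hx : pvKey x = k
    · cases hg : t.filter (fun l => pvKey l == k) with
      | nil =>
        have hany : t.any (fun y => pvKey y == k) = false := pv_any_of_filter_nil hg
        rw [List.filter_cons_of_pos (by simp [hx]), hg]
        simp only [List.dropLast_singleton, List.foldl_nil, pvPrune, hany, Bool.and_false,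
          if_neg (by decide : ¬(false = true))]
        rw [pvPrune_of_le_one k t (by simp [hg])]
      | cons g gs =>
        have hgne : t.filter (fun l => pvKey l == k) ≠ [] := by simp [hg]
        have hany : t.any (fun y => pvKey y == k) = true := pv_any_of_filter_ne hgne
        rw [List.filter_cons_of_pos (by simp [hx]), List.dropLast_cons_of_ne_nil hgne]
        simp only [List.foldl_cons, PySem.List.remove?_cons_self, Option.getD_some]
        rw [ih]
        simp [pvPrune, hx, hany]
    · have hb : (pvKey x == k) = false := by simpa using hx
      rw [List.filter_cons_of_neg (by simp [hx])]
      have hall : ∀ v ∈ (t.filter (fun l => pvKey l == k)).dropLast, v ≠ x := by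
        intro v hv
        have hvf := (List.dropLast_sublist (t.filter (fun l => pvKey l == k))).mem hv
        have hvk : pvKey v = k := by simpa using List.of_mem_filter hvf
        intro hvx; exact hx (hvx ▸ hvk)
      rw [pvRemove_cons_ne x _ t hall, ih]
      simp [pvPrune, hb]

theorem pvPruneSet_nil : ∀ (ls : List (List String)), pvPruneSet [] ls = ls := by
  intro ls
  induction ls with
  | nil => rfl
  | cons x xs ih => simp [pvPruneSet, ih]

theorem pvPruneSet_cons (k : String) (K : List String) : ∀ (ls : List (List String)),
    pvPruneSet (k :: K) ls = pvPruneSet K (pvPrune k ls) := by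
  intro ls
  induction ls with
  | nil => rfl
  | cons x xs ih =>
    by_cases hx : pvKey x = k
    · cases ha : xs.any (fun y => pvKey y == k) with
      | true =>
        have h1 : pvPruneSet (k :: K) (x :: xs) = pvPruneSet (k :: K) xs := by
          simp [pvPruneSet, hx, ha]
        have h2 : pvPrune k (x :: xs) = pvPrune k xs := by
          simp [pvPrune, hx, ha]
        rw [h1, h2, ih]
      | false =>
        have hpa : (pvPrune k xs).any (fun y => pvKey y == k) = false := by
          rw [List.any_eq_false] at ha ⊢
          intro y hy; exact ha y (pvPrune_sub hy)
        have h1 : pvPruneSet (k :: K) (x :: xs) = x :: pvPruneSet (k :: K) xs := by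
          simp [pvPruneSet, hx, ha]
        have h2 : pvPrune k (x :: xs) = x :: pvPrune k xs := by
          simp [pvPrune, hx, ha]
        have h3 : pvPruneSet K (x :: pvPrune k xs) = x :: pvPruneSet K (pvPrune k xs) := by
          simp [pvPruneSet, hx, hpa]
        rw [h1, h2, h3, ih]
    · have hb : (pvKey x == k) = false := by simpa using hx
      have hpa : (pvPrune k xs).any (fun y => pvKey y == pvKey x) = xs.any (fun y => pvKey y == pvKey x) :=
        pvPrune_any k (pvKey x) hx xs
      have h2 : pvPrune k (x :: xs) = x :: pvPrune k xs := by simp [pvPrune, hb]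
      rw [h2]
      cases hc : (K.contains (pvKey x) && xs.any fun y => pvKey y == pvKey x) with
      | true =>
        have h1 : pvPruneSet (k :: K) (x :: xs) = pvPruneSet (k :: K) xs := by
          simp only [pvPruneSet, List.contains_cons, hb, Bool.false_or, hc]; rfl
        have h3 : pvPruneSet K (x :: pvPrune k xs) = pvPruneSet K (pvPrune k xs) := by
          simp only [pvPruneSet, hpa, hc]; rfl
        rw [h1, h3, ih]
      | false =>
        have h1 : pvPruneSet (k :: K) (x :: xs) = x :: pvPruneSet (k :: K) xs := by
          simp only [pvPruneSet, List.contains_cons, hb, Bool.false_or, hc,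
            if_neg (by decide : ¬(false = true))]
        have h3 : pvPruneSet K (x :: pvPrune k xs) = x :: pvPruneSet K (pvPrune k xs) := by
          simp only [pvPruneSet, hpa, hc, if_neg (by decide : ¬(false = true))]
        rw [h1, h3, ih]

theorem pvFoldPrune : ∀ (K : List String) (ls : List (List String)),
    K.foldl (fun ls k => pvPrune k ls) ls = pvPruneSet K ls := by
  intro K
  induction K with
  | nil => intro ls; simp [pvPruneSet_nil]
  | cons k K ih => intro ls; simp only [List.foldl_cons]; rw [ih, pvPruneSet_cons]

theorem pvPruneSet_keep : ∀ (ls : List (List String)) (K : List String),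
    (∀ y ∈ ls, K.contains (pvKey y)) → pvPruneSet K ls = pvKeep ls := by
  intro ls
  induction ls with
  | nil => intro K _; rfl
  | cons x xs ih =>
    intro K h
    have hx : K.contains (pvKey x) = true := h x (by simp)
    simp only [pvPruneSet, pvKeep, hx, Bool.true_and]
    rw [ih K (fun y hy => h y (by simp [hy]))]

-- ===== A SIDE =====

theorem pvGroup_eq : ∀ (lines : List (List String)),
    lines.foldl (fun d line =>
      if d.contains (pvKey line) = false then
        d.insert (pvKey line) [line]
      else
        d.modify (pvKey line) [] (fun g => g ++ [line])) PySem.Dict.empty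
    = lines.foldl (fun d line => d.modify (pvKey line) [] (fun g => g ++ [line])) PySem.Dict.empty := by
  intro lines
  apply PySem.List.foldl_congr_mem
  intro d line _
  by_cases hc : d.contains (pvKey line) = true
  · simp [hc]
  · have hc' : d.contains (pvKey line) = false := by simpa using hc
    simp only [hc', PySem.Dict.modify,
      PySem.Dict.getD_of_not_contains d ([] : List (List String)) hc', List.nil_append]
    rfl

theorem pvGroup_getD (lines : List (List String)) (k : String) :
    (lines.foldl (fun d line => d.modify (pvKey line) [] (fun g => g ++ [line]))
      PySem.Dict.empty).getD k [] = lines.filter (fun l => pvKey l == k) := by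
  have h := PySem.Dict.getD_foldl_modify_append (lines.map (fun l => (pvKey l, l)))
    (PySem.Dict.empty) k
  rw [List.foldl_map] at h
  simp only [h, PySem.Dict.getD_empty, List.nil_append]
  rw [List.filter_map]
  simp [Function.comp_def]

theorem pvGroup_keys (lines : List (List String)) :
    (lines.foldl (fun d line => d.modify (pvKey line) [] (fun g => g ++ [line]))
      PySem.Dict.empty).keys = PySem.Set.ofList (lines.map pvKey) := by
  rw [PySem.Dict.keys_foldl_modify_key lines pvKey [] (fun _ line => fun g => g ++ [line])]
  simp [PySem.Dict.keys_empty, PySem.Set.update, PySem.Set.ofList_eq_foldl]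

-- the keyed outer loop, against fixed source filters, computes the iterated prune
theorem pvOuter (lines0 : List (List String)) : ∀ (K : List String) (ls : List (List String)),
    K.Nodup →
    (∀ k ∈ K, ls.filter (fun l => pvKey l == k) = lines0.filter (fun l => pvKey l == k)) →
    K.foldl (fun ls k =>
      if 1 < (lines0.filter (fun l => pvKey l == k)).length then
        ((lines0.filter (fun l => pvKey l == k)).dropLast).foldl
          (fun ls v => (PySem.List.remove? ls v).getD ls) ls
      else ls) ls
    = K.foldl (fun ls k => pvPrune k ls) ls := by
  intro K
  induction K with
  | nil => intro ls _ _; rfl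
  | cons k K ih =>
    intro ls hnd h
    have hk : ls.filter (fun l => pvKey l == k) = lines0.filter (fun l => pvKey l == k) :=
      h k (by simp)
    have hbody : (if 1 < (lines0.filter (fun l => pvKey l == k)).length then
        ((lines0.filter (fun l => pvKey l == k)).dropLast).foldl
          (fun ls v => (PySem.List.remove? ls v).getD ls) ls
      else ls) = pvPrune k ls := by
      rw [← hk]
      split
      · exact pvRemoveLoop k ls
      · rename_i hle
        exact (pvPrune_of_le_one k ls (by omega)).symm
    simp only [List.foldl_cons, hbody]
    apply ih (pvPrune k ls) (List.nodup_cons.mp hnd).2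
    intro k' hk'
    have hne : k' ≠ k := fun he => (List.nodup_cons.mp hnd).1 (he ▸ hk')
    rw [pvPrune_filter k k' hne, h k' (by simp [hk'])]

theorem pvA_keep (lines : List (List String)) : delete_repeated_lines_py lines = pvKeep lines := by
  show (lines.foldl _ PySem.Dict.empty).keys.foldl _ lines = _
  rw [pvGroup_eq]
  have hgetD : ∀ k, ((lines.foldl (fun d line => d.modify (pvKey line) [] (fun g => g ++ [line]))
      PySem.Dict.empty).get? k).getD []
      = lines.filter (fun l => pvKey l == k) := by
    intro k
    rw [← PySem.Dict.getD_eq_get?_getD, pvGroup_getD]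
  have h1 := PySem.List.foldl_congr_mem
    ((lines.foldl (fun d line => d.modify (pvKey line) [] (fun g => g ++ [line]))
      PySem.Dict.empty).keys)
    (fun ls k =>
      if 1 < (((lines.foldl (fun d line => d.modify (pvKey line) [] (fun g => g ++ [line]))
          PySem.Dict.empty).get? k).getD []).length then
        (PySem.List.slice (((lines.foldl (fun d line => d.modify (pvKey line) [] (fun g => g ++ [line]))
          PySem.Dict.empty).get? k).getD []) none (some (-1))).foldl
          (fun ls line => (PySem.List.remove? ls line).getD ls) ls
      else ls)
    (fun ls k =>
      if 1 < (lines.filter (fun l => pvKey l == k)).length then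
        ((lines.filter (fun l => pvKey l == k)).dropLast).foldl
          (fun ls v => (PySem.List.remove? ls v).getD ls) ls
      else ls)
    lines
    (by intro ls k _; simp only [hgetD, PySem.List.slice_to_neg_one])
  rw [h1, pvGroup_keys,
    pvOuter lines _ lines (PySem.Set.nodup_ofList _) (fun _ _ => rfl), pvFoldPrune]
  apply pvPruneSet_keep
  intro y hy
  simp only [List.contains_eq_mem, decide_eq_true_eq]
  exact (PySem.Set.mem_ofList _ _).mpr (List.mem_map_of_mem hy)

-- ===== B SIDE =====

theorem pvB_fst : ∀ (ys : List (List String)) (s : PySem.Set String) (acc : List (List String)),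
    (ys.foldl (fun (st : PySem.Set String × List (List String)) line =>
      if PySem.Set.contains st.1 (pvKey line) = false then
        (PySem.Set.add st.1 (pvKey line), st.2 ++ [line])
      else st) (s, acc)).1
    = (ys.map pvKey).foldl PySem.Set.add s := by
  intro ys
  induction ys with
  | nil => intro s acc; rfl
  | cons y ys ih =>
    intro s acc
    simp only [List.foldl_cons, List.map_cons]
    by_cases hc : PySem.Set.contains s (pvKey y) = false
    · rw [if_pos hc]
      exact ih _ _
    · rw [if_neg hc]
      have hct : PySem.Set.contains s (pvKey y) = true := by simpa using hc
      have hadd : PySem.Set.add s (pvKey y) = s := by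
        simp only [PySem.Set.add, hct]
        rfl
      rw [hadd]
      exact ih _ _

theorem pvB_keep (lines : List (List String)) : delete_repeated_lines_py_alt lines = pvKeep lines := by
  induction lines with
  | nil => rfl
  | cons x xs ih =>
    simp only [delete_repeated_lines_py_alt] at ih ⊢
    rw [List.reverse_cons, List.foldl_append]
    simp only [List.foldl_cons, List.foldl_nil]
    have hcont : PySem.Set.contains ((xs.reverse.foldl
        (fun (st : PySem.Set String × List (List String)) line =>
          if PySem.Set.contains st.1 (pvKey line) = false then
            (PySem.Set.add st.1 (pvKey line), st.2 ++ [line])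
          else st) (PySem.Set.empty, [])).1) (pvKey x)
        = xs.any (fun y => pvKey y == pvKey x) := by
      rw [pvB_fst xs.reverse PySem.Set.empty [],
        show (xs.reverse.map pvKey).foldl PySem.Set.add PySem.Set.empty
          = PySem.Set.ofList (xs.reverse.map pvKey) from (PySem.Set.ofList_eq_foldl _).symm]
      simp only [PySem.Set.contains, List.contains_eq_mem, PySem.Set.mem_ofList, List.mem_map,
        List.mem_reverse]
      rw [List.any_eq]
      simp
    cases ha : xs.any (fun y => pvKey y == pvKey x) with
    | true =>
      rw [ha] at hcont
      rw [if_neg (by rw [hcont]; simp)]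
      rw [show pvKeep (x :: xs) = pvKeep xs by simp [pvKeep, ha]]
      exact ih
    | false =>
      rw [ha] at hcont
      rw [if_pos hcont]
      rw [show pvKeep (x :: xs) = x :: pvKeep xs by simp [pvKeep, ha]]
      simp only [List.reverse_append, List.reverse_cons, List.reverse_nil, List.nil_append,
        List.cons_append]
      rw [ih]

-- ===== VERDICT (by name: the statement is the Claim_ definition above) =====
theorem delete_repeated_lines_py_spec : Claim_equal_delete_repeated_lines_py := by
  intro lines _ _
  show delete_repeated_lines_py lines = delete_repeated_lines_py_alt lines
  rw [pvA_keep, pvB_keep]
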